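-- pv_equiv track=rewrite | github.com/daniel-reich/ubiquitous-fiesta | eMRXLJLpaSTxZvsKN_10.py | is_ladder_safe
-- ===== SOURCE A (Python) =====
-- def is_ladder_safe(ldr):
--     n_rows, n_cols = len(ldr), len(ldr[0])
--     if n_cols < 5:
--         return False
--     no_rung = '#' + ' ' * (n_cols - 2) + '#'
--     rung = '#' * n_cols
--     if not (ldr[0] == no_rung and ldr[-1] == no_rung and ldr[1] == rung):
--         return False
--     rung_positions = [((1 if ldr[r] == rung else 0)
--                        if ldr[r] in [rung, no_rung] else 2)
--                       for r in range(2, n_rows - 1)]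
--     if 2 in rung_positions or 1 not in rung_positions:
--         return False
--     gap_len = rung_positions.index(1)
--     if not (gap_len < 4
--             and rung_positions[: gap_len + 1] * rung_positions.count(1)
--             == rung_positions):
--         return False
--     return True
-- ===== SOURCE B (Python) =====
-- def is_ladder_safe(ldr):
--     n_rows, n_cols = len(ldr), len(ldr[0])
--     if n_cols < 5:
--         return False
--     no_rung = '#' + ' ' * (n_cols - 2) + '#'
--     rung = '#' * n_cols
--     for period in (1, 2, 3, 4):
--         k, r = divmod(n_rows - 3, period)
--         if r == 0 and k >= 1:
--             expected = ([no_rung, rung]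
--                         + ([no_rung] * (period - 1) + [rung]) * k
--                         + [no_rung])
--             if ldr == expected:
--                 return True
--     return False
-- ===== Notes on version B (the rewrite author's own statement) =====
-- stated objective: alternative
-- what changed: B is generate-and-compare: it builds the (at most four) fully valid ladder grids of the input's height and width — one per rung period 1..4 whose rung count divides the middle height — and returns whether the input equals any of them, replacing A's header checks, per-row 0/1/2 classification, first-rung search and prefix-tiling test entirely.
import Mathlib
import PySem

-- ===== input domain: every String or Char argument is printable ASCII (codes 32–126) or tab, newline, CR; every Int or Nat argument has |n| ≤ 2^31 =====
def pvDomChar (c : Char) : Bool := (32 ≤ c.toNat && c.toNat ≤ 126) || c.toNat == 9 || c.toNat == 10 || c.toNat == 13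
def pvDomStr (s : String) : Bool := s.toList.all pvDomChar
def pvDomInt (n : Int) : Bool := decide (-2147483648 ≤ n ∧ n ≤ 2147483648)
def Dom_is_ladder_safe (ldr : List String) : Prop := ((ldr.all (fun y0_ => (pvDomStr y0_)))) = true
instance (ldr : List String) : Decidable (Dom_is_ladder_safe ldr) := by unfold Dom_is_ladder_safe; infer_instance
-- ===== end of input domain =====

-- B is generate-and-compare: it builds the at-most-four valid ladders of the input's size
-- (one per rung period 1..4 dividing the middle height) and checks whether the input equals any
-- of them, replacing A's header checks, row classification, rung search and tiling test.

-- ===== PORT A =====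

-- Python's 'list * k' for a nonnegative count (both Pythons use it)
def repeatList {α : Type} (k : Nat) (pat : List α) : List α :=
  match k with
  | 0 => []
  | k + 1 => pat ++ repeatList k pat

def is_ladder_safe (ldr : List String) : Bool :=
  match ldr with
  | [] => false   -- Python raises IndexError on ldr[0]; excluded by Pre_
  | r0 :: _ =>
    let n_rows : Int := ldr.length
    let n_cols : Int := PySem.Str.len r0
    if n_cols < 5 then false
    else
      let no_rung : String := String.ofList ('#' :: (List.replicate (n_cols - 2).toNat ' ' ++ ['#']))
      let rung : String := String.ofList (List.replicate n_cols.toNat '#')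
      -- ldr[1] raises when ldr = [r0] and the two no_rung tests pass; excluded by Pre_
      if ¬ (r0 = no_rung ∧ PySem.List.pyGetD ldr (-1) "" = no_rung ∧ PySem.List.pyGetD ldr 1 "" = rung) then false
      else
        let rung_positions : List Int :=
          (PySem.List.pyRange 2 (n_rows - 1) 1).map (fun r =>
            let row := PySem.List.pyGetD ldr r ""
            if row = rung ∨ row = no_rung then (if row = rung then 1 else 0) else 2)
        if (2 : Int) ∈ rung_positions ∨ (1 : Int) ∉ rung_positions then false
        else
          match PySem.List.index? rung_positions (1 : Int) with
          | none => false   -- unreachable: 1 ∈ rung_positions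
          | some gap_len =>
            if gap_len < 4 ∧
               repeatList (PySem.List.count rung_positions 1) (rung_positions.take (gap_len + 1))
                 = rung_positions
            then true else false

-- ===== PORT B =====

def is_ladder_safe_alt (ldr : List String) : Bool :=
  match ldr with
  | [] => false   -- Python raises IndexError on ldr[0]; excluded by Pre_
  | r0 :: _ =>
    let n_rows : Int := ldr.length
    let n_cols : Int := PySem.Str.len r0
    if n_cols < 5 then false
    else
      let no_rung : String := String.ofList ('#' :: (List.replicate (n_cols - 2).toNat ' ' ++ ['#']))
      let rung : String := String.ofList (List.replicate n_cols.toNat '#')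
      ([1, 2, 3, 4] : List Int).any (fun period =>
        let k := PySem.Int.floordiv (n_rows - 3) period
        let r := PySem.Int.mod (n_rows - 3) period
        r == 0 && decide (1 ≤ k) &&
          decide (ldr = no_rung :: rung ::
            (repeatList k.toNat (List.replicate (period - 1).toNat no_rung ++ [rung]) ++ [no_rung])))

-- ===== PRECONDITION & SPEC =====
-- Pre_ excludes exactly the inputs where the Python A raises IndexError: the empty list, and a
-- single-row list whose only row is a no-rung row of width ≥ 5 (then ldr[1] is evaluated).
def Pre_is_ladder_safe (ldr : List String) : Prop :=
  ldr ≠ [] ∧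
  ¬ (ldr.length = 1 ∧ 5 ≤ (ldr.headI).toList.length ∧
     (ldr.headI).toList = '#' :: (List.replicate ((ldr.headI).toList.length - 2) ' ' ++ ['#']))
instance (ldr : List String) : Decidable (Pre_is_ladder_safe ldr) := by
  unfold Pre_is_ladder_safe; infer_instance

def pvWitness_is_ladder_safe : List String := ["#   #", "#####", "#####", "#   #"]

def Spec_is_ladder_safe (ldr : List String) (out : Bool) : Prop := out = is_ladder_safe_alt ldr
instance (ldr : List String) (out : Bool) : Decidable (Spec_is_ladder_safe ldr out) := by
  unfold Spec_is_ladder_safe; infer_instance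

-- ===== CLAIM (what is proved, stated in full; the proofs are below) =====
def Claim_equal_is_ladder_safe : Prop := ∀ (ldr : List String), Dom_is_ladder_safe ldr → Pre_is_ladder_safe ldr → Spec_is_ladder_safe ldr (is_ladder_safe ldr)

-- ===== LEMMAS AND PROOFS =====

-- A's 0/1/2 row code and its decoder
def ench (rg nr : String) (row : String) : Int :=
  if row = rg ∨ row = nr then (if row = rg then 1 else 0) else 2
def decS (rg nr : String) (v : Int) : String := if v = 1 then rg else nr

lemma length_repeatList {α : Type} (k : Nat) (l : List α) :
    (repeatList k l).length = k * l.length := by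
  induction k with
  | zero => simp [repeatList]
  | succ k ih => simp [repeatList, ih]; ring

lemma map_repeatList {α β : Type} (f : α → β) (k : Nat) (l : List α) :
    (repeatList k l).map f = repeatList k (l.map f) := by
  induction k with
  | zero => simp [repeatList]
  | succ k ih => simp [repeatList, ih]

lemma mem_repeatList {α : Type} {x : α} {k : Nat} {l : List α} :
    x ∈ repeatList k l → x ∈ l := by
  induction k with
  | zero => simp [repeatList]
  | succ k ih => intro h; rcases List.mem_append.mp h with h | h
                 · exact h
                 · exact ih h

lemma repeatList_pos {α : Type} {k : Nat} (hk : 1 ≤ k) (l : List α) :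
    repeatList k l = l ++ repeatList (k - 1) l := by
  cases k with
  | zero => omega
  | succ k => simp [repeatList]

lemma count_repeatList_int (k g : Nat) :
    (repeatList k (List.replicate g (0 : Int) ++ [1])).count 1 = k := by
  induction k with
  | zero => simp [repeatList]
  | succ k ih => simp [repeatList, List.count_append, ih, List.count_replicate]

-- decode a mid whose codes avoid 2 back to the rows
lemma decode (rg nr : String) (mid : List String)
    (h2 : (2 : Int) ∉ mid.map (ench rg nr)) :
    mid = (mid.map (ench rg nr)).map (decS rg nr) := by
  induction mid with
  | nil => simp
  | cons row rest ih =>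
    simp only [List.map_cons, List.mem_cons, not_or] at h2 ⊢
    obtain ⟨hh, ht⟩ := h2
    refine List.cons_eq_cons.mpr ⟨?_, ih ht⟩
    by_cases h1 : row = rg
    · simp [ench, decS, h1]
    · by_cases h0 : row = nr
      · simp [ench, decS, h1, h0]
      · exact absurd (by simp [ench, h1, h0] : (2:Int) = ench rg nr row) hh

-- ench maps the generated pattern to the 0/1 pattern
lemma ench_pat (rg nr : String) (hne : rg ≠ nr) (g : Nat) :
    (List.replicate g nr ++ [rg]).map (ench rg nr)
      = List.replicate g (0 : Int) ++ [1] := by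
  simp [ench, List.map_replicate, hne.symm]

-- the two header strings differ when the width is at least 5
lemma nr_ne_rg (c : Int) (hc : 5 ≤ c) :
    String.ofList ('#' :: (List.replicate (c - 2).toNat ' ' ++ ['#']))
      ≠ String.ofList (List.replicate c.toNat '#') := by
  intro h
  have hl : ('#' :: (List.replicate (c - 2).toNat ' ' ++ ['#']))
      = List.replicate c.toNat '#' := by
    simpa using String.ofList_eq.mp h
  obtain ⟨-, hall⟩ := List.eq_replicate_iff.mp hl
  have hm : ' ' ∈ ('#' :: (List.replicate (c - 2).toNat ' ' ++ ['#'])) := by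
    have : ' ' ∈ List.replicate (c - 2).toNat ' ' := by
      rw [List.mem_replicate]; exact ⟨by omega, rfl⟩
    simp [this]
  exact absurd (hall ' ' hm) (by decide)

-- indexing over a range equals mapping over the slice (A's comprehension)
lemma map_pyRange_pyGetD_slice {α β : Type} (xs : List α) (d : α) (f : α → β)
    (a b : Int) (h0 : 0 ≤ a) (hb0 : 0 ≤ b) (hb : b ≤ xs.length) :
    (PySem.List.pyRange a b 1).map (fun r => f (PySem.List.pyGetD xs r d))
      = (PySem.List.slice xs (some a) (some b)).map f := by
  rw [PySem.List.slice_toNat xs h0 hb0]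
  have key : ∀ (n : Nat) (a : Int), 0 ≤ a → (b - a).toNat = n →
      (PySem.List.pyRange a b 1).map (fun r => f (PySem.List.pyGetD xs r d))
        = ((xs.drop a.toNat).take (b.toNat - a.toNat)).map f := by
    intro n
    induction n with
    | zero =>
      intro a ha hn
      have hba : b ≤ a := by omega
      rw [PySem.List.pyRange_one_eq_nil hba]
      have : b.toNat - a.toNat = 0 := by omega
      simp [this]
    | succ n ih =>
      intro a ha hn
      have hab : a < b := by omega
      have halen : a.toNat < xs.length := by omega
      rw [PySem.List.pyRange_one_cons hab, List.map_cons,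
          List.drop_eq_getElem_cons halen]
      have ht : b.toNat - a.toNat = (b.toNat - (a + 1).toNat) + 1 := by omega
      rw [ht, List.take_succ_cons, List.map_cons]
      have h1 : (a + 1).toNat = a.toNat + 1 := by omega
      rw [h1]
      have := ih (a + 1) (by omega) (by omega)
      rw [h1] at this
      rw [PySem.List.pyGetD_eq_getElem (xs := xs) (i := a) (d := d) ha (by omega), this]
  exact key (b - a).toNat a h0 rfl

-- the structural characterisation both ports are proved equivalent to
def LadderQ (ldr : List String) (nr rg : String) : Prop :=
  ∃ g : Nat, g < 4 ∧ ∃ k : Nat, 1 ≤ k ∧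
    ldr = nr :: rg :: (repeatList k (List.replicate g nr ++ [rg]) ++ [nr])

-- A's middle analysis is exactly "mid is a full tiling with gap < 4"
lemma A_core (rg nr : String) (hne : rg ≠ nr) (mid : List String) :
    ((if (2 : Int) ∈ mid.map (ench rg nr) ∨ (1 : Int) ∉ mid.map (ench rg nr) then false
      else
        match PySem.List.index? (mid.map (ench rg nr)) (1 : Int) with
        | none => false
        | some g =>
          if g < 4 ∧
             repeatList (PySem.List.count (mid.map (ench rg nr)) 1)
               ((mid.map (ench rg nr)).take (g + 1)) = mid.map (ench rg nr)
          then true else false) = true)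
    ↔ ∃ g : Nat, g < 4 ∧ ∃ k : Nat, 1 ≤ k ∧
        mid = repeatList k (List.replicate g nr ++ [rg]) := by
  constructor
  · intro h
    set RP := mid.map (ench rg nr) with hRP
    by_cases hbad : (2 : Int) ∈ RP ∨ (1 : Int) ∉ RP
    · rw [if_pos hbad] at h; exact absurd h (by simp)
    · rw [if_neg hbad] at h
      push Not at hbad
      obtain ⟨h2, h1⟩ := hbad
      cases hidx : PySem.List.index? RP (1 : Int) with
      | none => rw [hidx] at h; exact absurd h (by simp)
      | some g =>
        rw [hidx] at h
        have hcond : g < 4 ∧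
            repeatList (PySem.List.count RP 1) (RP.take (g + 1)) = RP := by
          by_contra hc
          exact hc (by rw [PySem.List.count_eq]; simpa using h)
        obtain ⟨hg4, htile⟩ := hcond
        obtain ⟨pre, suf, hsplit, hlen, hnotin⟩ :=
          (PySem.List.index?_eq_some_iff _ _ _).mp hidx
        -- every code is 0 or 1
        have hvals : ∀ x ∈ RP, x = 0 ∨ x = 1 := by
          intro x hx
          obtain ⟨row, _, rfl⟩ := List.mem_map.mp hx
          by_cases ha : row = rg ∨ row = nr
          · rcases ha with ha | ha
            · right; simp [ench, ha]
            · by_cases hb : row = rg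
              · right; simp [ench, hb]
              · left; simp [ench, ha, hne.symm]
          · exfalso
            have he : ench rg nr row = 2 := by simp [ench, ha]
            rw [he] at hx
            exact h2 hx
        have hpre : pre = List.replicate g (0 : Int) := by
          refine List.eq_replicate_iff.mpr ⟨hlen, ?_⟩
          intro x hx
          have hx' : x ∈ RP := by rw [hsplit]; exact List.mem_append_left _ hx
          rcases hvals x hx' with h | h
          · exact h
          · exact absurd (h ▸ hx) hnotin
        have htake : RP.take (g + 1) = List.replicate g (0 : Int) ++ [1] := by
          rw [hsplit, ← hlen, show pre.length + 1 = pre.length + [(1:Int)].length by simp,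
              List.take_append]
          simp [hpre]
        set c := PySem.List.count RP 1 with hc
        have hc1 : 1 ≤ c := by
          rw [hc, PySem.List.count_eq]
          exact List.count_pos_iff.mpr h1
        refine ⟨g, hg4, c, hc1, ?_⟩
        have hmid : mid = RP.map (decS rg nr) := decode rg nr mid h2
        rw [hmid, ← htile, htake, map_repeatList]
        congr 1
        simp [decS, List.map_replicate]
  · rintro ⟨g, hg4, k, hk1, rfl⟩
    set patS := List.replicate g nr ++ [rg] with hpatS
    have hmap : (repeatList k patS).map (ench rg nr)
        = repeatList k (List.replicate g (0 : Int) ++ [1]) := by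
      rw [map_repeatList, ench_pat rg nr hne]
    rw [hmap]
    set patI := List.replicate g (0 : Int) ++ [1] with hpatI
    have hdecomp : repeatList k patI = patI ++ repeatList (k - 1) patI :=
      repeatList_pos hk1 _
    have h2 : (2 : Int) ∉ repeatList k patI := by
      intro hx
      have := mem_repeatList hx
      simp [hpatI, List.mem_replicate] at this
    have h1 : (1 : Int) ∈ repeatList k patI := by
      rw [hdecomp]
      exact List.mem_append_left _ (by simp [hpatI])
    rw [if_neg (by push Not; exact ⟨h2, h1⟩)]
    have hidx : PySem.List.index? (repeatList k patI) (1 : Int) = some g := by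
      refine (PySem.List.index?_eq_some_iff _ _ _).mpr
        ⟨List.replicate g (0 : Int), repeatList (k - 1) patI, ?_, by simp, by simp⟩
      rw [hdecomp, hpatI]; simp
    rw [hidx]
    have hcnt : PySem.List.count (repeatList k patI) 1 = k := by
      rw [PySem.List.count_eq, hpatI, count_repeatList_int]
    have htake : (repeatList k patI).take (g + 1) = patI := by
      rw [hdecomp, show g + 1 = patI.length from (by simp [hpatI]), List.take_left]
    have hcnt' : List.count (1 : Int) (repeatList k patI) = k := by
      rw [← PySem.List.count_eq]; exact hcnt
    simp [hcnt', htake, hg4]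

-- last element of a cons-cons list via pyGetD -1
lemma pyGetD_cc_neg_one (r0 r1 : String) (rest : List String) (h : rest ≠ []) :
    PySem.List.pyGetD (r0 :: r1 :: rest) (-1) "" = rest.getLast h := by
  have := PySem.List.pyGetD_neg_one (xs := r0 :: r1 :: rest) (d := "") (by simp)
  rw [this]
  simp [List.getLast_cons, h]

-- the slice 2..n-1 of a list with at least two rows is the middle without the last row
lemma slice_mid (r0 r1 : String) (rest : List String) :
    PySem.List.slice (r0 :: r1 :: rest) (some 2)
        (some (((r0 :: r1 :: rest).length : Int) - 1)) = rest.dropLast := by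
  have hlen : ((r0 :: r1 :: rest).length : Int) = (rest.length : Int) + 2 := by
    simp; omega
  rw [hlen, PySem.List.slice_toNat _ (by norm_num) (by omega)]
  have h2 : ((2 : Int)).toNat = 2 := rfl
  have h1 : (((rest.length : Int) + 2) - 1).toNat = rest.length + 1 := by omega
  rw [h2, h1]
  simp [List.dropLast_eq_take]

-- A's range comprehension, instantiated
lemma map_RP (xs : List String) (rg nr : String) (b : Int)
    (hb0 : 0 ≤ b) (hb : b ≤ xs.length) :
    (PySem.List.pyRange 2 b 1).map
        (fun r => if PySem.List.pyGetD xs r "" = rg ∨ PySem.List.pyGetD xs r "" = nr then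
                    if PySem.List.pyGetD xs r "" = rg then (1 : Int) else 0 else 2)
      = (PySem.List.slice xs (some 2) (some b)).map (ench rg nr) :=
  map_pyRange_pyGetD_slice xs "" (ench rg nr) 2 b (by norm_num) hb0 hb

-- A = true ↔ LadderQ  (width ≥ 5, nonempty input)
lemma A_iff (r0 : String) (rest : List String)
    (hc : ¬ PySem.Str.len r0 < 5) :
    (is_ladder_safe (r0 :: rest) = true
      ↔ LadderQ (r0 :: rest)
          (String.ofList ('#' :: (List.replicate (PySem.Str.len r0 - 2).toNat ' ' ++ ['#'])))
          (String.ofList (List.replicate (PySem.Str.len r0).toNat '#'))) := by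
  set NR := String.ofList ('#' :: (List.replicate (PySem.Str.len r0 - 2).toNat ' ' ++ ['#'])) with hNR
  set RG := String.ofList (List.replicate (PySem.Str.len r0).toNat '#') with hRG
  have hne : RG ≠ NR := (nr_ne_rg (PySem.Str.len r0) (by omega)).symm
  simp only [is_ladder_safe, ← hNR, ← hRG, if_neg hc]
  by_cases hH : r0 = NR ∧ PySem.List.pyGetD (r0 :: rest) (-1) "" = NR ∧
      PySem.List.pyGetD (r0 :: rest) 1 "" = RG
  · rw [if_neg (not_not_intro hH)]
    rw [map_RP (r0 :: rest) RG NR _ (by simp) (by simp)]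
    rw [A_core RG NR hne]
    obtain ⟨h0, hlast, h1⟩ := hH
    constructor
    · rintro ⟨g, hg4, k, hk1, hmid⟩
      -- the middle is nonempty, so the list has at least two rows after the header
      have hmidne : PySem.List.slice (r0 :: rest) (some 2)
          (some (((r0 :: rest).length : Int) - 1)) ≠ [] := by
        rw [hmid]
        intro hnil
        have := congrArg List.length hnil
        rw [length_repeatList] at this
        simp at this
        omega
      match rest with
      | [] =>
        exfalso
        apply hmidne
        rw [PySem.List.slice_toNat _ (by norm_num) (by simp)]
        simp
      | r1 :: rest' =>
        match rest' with
        | [] =>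
          exfalso
          apply hmidne
          rw [PySem.List.slice_toNat _ (by norm_num) (by simp)]
          simp
        | r2 :: rest'' =>
          have hrne : (r2 :: rest'' : List String) ≠ [] := by simp
          rw [slice_mid r0 r1 (r2 :: rest'')] at hmid
          have hlast' : (r2 :: rest'').getLast hrne = NR := by
            rw [← pyGetD_cc_neg_one r0 r1 (r2 :: rest'') hrne]; exact hlast
          have h1' : r1 = RG := by
            have : PySem.List.pyGetD (r0 :: r1 :: r2 :: rest'') 1 "" = r1 := by
              have := PySem.List.pyGetD_eq_getElem (xs := r0 :: r1 :: r2 :: rest'')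
                (i := 1) (d := "") (by norm_num) (by simp; omega)
              rw [this]; rfl
            rw [this] at h1; exact h1
          refine ⟨g, hg4, k, hk1, ?_⟩
          rw [h0, h1', ← hmid]
          have : (r2 :: rest'').dropLast ++ [(r2 :: rest'').getLast hrne] = r2 :: rest'' :=
            List.dropLast_append_getLast hrne
          rw [hlast'] at this
          rw [this]
    · rintro ⟨g, hg4, k, hk1, hldr⟩
      refine ⟨g, hg4, k, hk1, ?_⟩
      have hrest : rest = RG :: (repeatList k (List.replicate g NR ++ [RG]) ++ [NR]) :=
        (List.cons_eq_cons.mp hldr).2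
      rw [hrest, slice_mid, List.dropLast_concat]
  · rw [if_pos hH]
    simp only [Bool.false_eq_true, false_iff]
    rintro ⟨g, hg4, k, hk1, hldr⟩
    apply hH
    have h0 : r0 = NR := (List.cons_eq_cons.mp hldr).1
    have hrest : rest = RG :: (repeatList k (List.replicate g NR ++ [RG]) ++ [NR]) :=
      (List.cons_eq_cons.mp hldr).2
    refine ⟨h0, ?_, ?_⟩
    · rw [hldr]
      have : (NR :: RG :: (repeatList k (List.replicate g NR ++ [RG]) ++ [NR]) : List String)
          = (NR :: RG :: repeatList k (List.replicate g NR ++ [RG])) ++ [NR] := by simp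
      rw [this, PySem.List.pyGetD_neg_one_append_singleton]
    · rw [hldr]
      have := PySem.List.pyGetD_eq_getElem
        (xs := NR :: RG :: (repeatList k (List.replicate g NR ++ [RG]) ++ [NR]))
        (i := 1) (d := "") (by norm_num) (by simp; omega)
      rw [this]
      rfl

-- B = true ↔ LadderQ
lemma B_iff (r0 : String) (rest : List String)
    (hc : ¬ PySem.Str.len r0 < 5) :
    (is_ladder_safe_alt (r0 :: rest) = true
      ↔ LadderQ (r0 :: rest)
          (String.ofList ('#' :: (List.replicate (PySem.Str.len r0 - 2).toNat ' ' ++ ['#'])))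
          (String.ofList (List.replicate (PySem.Str.len r0).toNat '#'))) := by
  set NR := String.ofList ('#' :: (List.replicate (PySem.Str.len r0 - 2).toNat ' ' ++ ['#'])) with hNR
  set RG := String.ofList (List.replicate (PySem.Str.len r0).toNat '#') with hRG
  simp only [is_ladder_safe_alt, ← hNR, ← hRG, if_neg hc, List.any_eq_true,
    Bool.and_eq_true, beq_iff_eq, decide_eq_true_eq]
  constructor
  · rintro ⟨p, hp, ⟨hmod, hfd⟩, hldr⟩
    refine ⟨(p - 1).toNat, ?_, (PySem.Int.floordiv (((r0 :: rest).length : Int) - 3) p).toNat,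
      by omega, hldr⟩
    simp only [List.mem_cons, List.not_mem_nil, or_false] at hp
    rcases hp with rfl | rfl | rfl | rfl <;> decide
  · rintro ⟨g, hg4, k, hk1, hldr⟩
    refine ⟨((g + 1 : Nat) : Int), ?_, ?_⟩
    · simp only [List.mem_cons]
      interval_cases g <;> simp
    · have hlenN : (r0 :: rest).length = k * (g + 1) + 3 := by
        rw [hldr]
        simp [length_repeatList]
      have hlen : ((r0 :: rest).length : Int) - 3 = ((k * (g + 1) : Nat) : Int) := by
        rw [hlenN]
        push_cast
        ring
      have hfd : PySem.Int.floordiv (((r0 :: rest).length : Int) - 3) ((g + 1 : Nat) : Int)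
          = ((k : Nat) : Int) := by
        rw [hlen, PySem.Int.floordiv_natCast]
        congr 1
        exact Nat.mul_div_cancel k (by omega)
      have hmod : PySem.Int.mod (((r0 :: rest).length : Int) - 3) ((g + 1 : Nat) : Int) = 0 := by
        rw [hlen, PySem.Int.mod_natCast]
        simp [Nat.mul_mod_left]
      refine ⟨⟨hmod, by rw [hfd]; exact_mod_cast hk1⟩, ?_⟩
      rw [hfd]
      have htn : ((k : Nat) : Int).toNat = k := Int.toNat_natCast k
      rw [htn]
      have hgg : (((g + 1 : Nat) : Int) - 1).toNat = g := by omega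
      rw [hgg]
      exact hldr

-- ===== VERDICT (by name: the statement is the Claim_ definition above) =====
theorem is_ladder_safe_spec : Claim_equal_is_ladder_safe := by
  intro ldr _hdom hpre
  unfold Spec_is_ladder_safe
  match ldr with
  | [] => exact absurd rfl hpre.1
  | r0 :: rest =>
    by_cases hc : PySem.Str.len r0 < 5
    · simp only [is_ladder_safe, is_ladder_safe_alt, if_pos hc]
    · symm
      rw [Bool.eq_iff_iff, B_iff r0 rest hc, A_iff r0 rest hc]
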